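-- pv_equiv track=rewrite | github.com/daily-coding-ps/ps | 2022-01-4주차/GreedyQ6_무지의먹방라이브_신경덕.py | solution
-- ===== SOURCE A (Python) =====
-- import heapq
--
-- def solution(food_times, k):
--     answer = -1
--     pq = []
--     for i, v in enumerate(food_times):
--         heapq.heappush(pq, (v, i+1))
--
--     food_len = len(food_times)
--     prev = 0
--
--     while pq:
--         temp = (pq[0][0] - prev) * food_len
--
--         if k >= temp:
--             k -= temp
--             prev, _ = heapq.heappop(pq)
--             food_len -= 1
--         else:
--             answer = sorted(pq, key = lambda x: x[1])[k % food_len][1]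
--             break
--
--     return answer
-- ===== SOURCE B (Python) =====
-- def solution(food_times, k):
--     n = len(food_times)
--     if n == 0:
--         return -1
--     times = sorted(food_times)
--     # S[j] = total seconds consumed by the first j exhausted foods, in closed form
--     S = [0]
--     acc = 0
--     for j in range(n):
--         S.append(acc + times[j] * (n - j))
--         acc += times[j]
--     if k >= S[n]:
--         return -1
--     # S[1..n] is nondecreasing, so the break point is a count, not a scan with state
--     j = sum(1 for i in range(n) if S[i + 1] <= k)
--     t = times[j]
--     skip = j - times.index(t)  # equal-valued foods already exhausted
--     r = (k - S[j]) % (n - j)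
--     survivors = []
--     for i, v in enumerate(food_times):
--         if v > t:
--             survivors.append(i + 1)
--         elif v == t:
--             if skip > 0:
--                 skip -= 1
--             else:
--                 survivors.append(i + 1)
--     return survivors[r]
-- ===== Notes on version B (the rewrite author's own statement) =====
-- stated objective: alternative
-- what changed: B replaces A's heap simulation entirely by arithmetic: it sorts the values once, computes in closed form the prefix array S[j] of seconds consumed by the first j exhausted foods, finds the break point as a count of indices with S[i+1] <= k (valid since S[1..n] is monotone), and reconstructs the answer with one left-to-right scan over the original list that skips the already-exhausted equal-valued foods, instead of A's n heappush/heappop calls and a sort of the surviving heap.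
import Mathlib
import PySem

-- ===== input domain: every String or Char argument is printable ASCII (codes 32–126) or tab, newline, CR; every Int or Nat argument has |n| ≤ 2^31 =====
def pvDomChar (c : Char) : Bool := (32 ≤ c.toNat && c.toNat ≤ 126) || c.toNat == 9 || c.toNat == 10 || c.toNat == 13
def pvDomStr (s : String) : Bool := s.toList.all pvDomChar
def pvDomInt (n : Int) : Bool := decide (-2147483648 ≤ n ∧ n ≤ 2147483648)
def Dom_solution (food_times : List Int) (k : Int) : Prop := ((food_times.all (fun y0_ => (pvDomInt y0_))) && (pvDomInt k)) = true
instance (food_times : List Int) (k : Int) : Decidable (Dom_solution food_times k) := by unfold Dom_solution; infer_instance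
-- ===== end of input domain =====

-- B drops A's heap simulation entirely: it sorts the values once, computes the consumed-seconds
-- prefix array S in closed form, locates the break point as a count of indices with S[i+1] ≤ k,
-- and rebuilds the answer by one scan over the original list (objective: alternative).

-- ===== PORT A =====
-- Python's `<` on int pairs (the comparison heapq performs on its (time, index) entries)
def pyLt (a b : Int × Int) : Bool := a.1 < b.1 || (a.1 == b.1 && a.2 < b.2)

-- heapq._siftdown(heap, startpos, pos) with newitem = heap[pos] held aside, literal port.
-- `fuel` only bounds the iteration count (pos strictly decreases, so `pos` iterations
-- suffice and the 0-case is never reached at the call sites); it guards totality, nothing else.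
def siftdownLoop (fuel : Nat) (heap : List (Int × Int)) (startpos pos : Nat)
    (newitem : Int × Int) : List (Int × Int) :=
  match fuel with
  | 0 => heap.set pos newitem
  | fuel + 1 =>
    if startpos < pos then
      let parentpos := (pos - 1) / 2
      let parent := heap.getD parentpos ((0 : Int), (0 : Int))
      if pyLt newitem parent then
        siftdownLoop fuel (heap.set pos parent) startpos parentpos newitem
      else heap.set pos newitem
    else heap.set pos newitem

-- heapq.heappush: append, then sift down from the last slot
def heappush (heap : List (Int × Int)) (item : Int × Int) : List (Int × Int) :=
  siftdownLoop heap.length (heap ++ [item]) 0 heap.length item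

-- the while-loop of heapq._siftup (descend to a leaf, always moving the smaller child up);
-- `fuel` bounds the iteration count (pos strictly increases below heap.length)
def siftupLoop (fuel : Nat) (heap : List (Int × Int)) (pos : Nat) : List (Int × Int) × Nat :=
  match fuel with
  | 0 => (heap, pos)
  | fuel + 1 =>
    let endpos := heap.length
    let childpos := 2 * pos + 1
    if childpos < endpos then
      let rightpos := childpos + 1
      let childpos :=
        if rightpos < endpos &&
            !pyLt (heap.getD childpos ((0 : Int), (0 : Int))) (heap.getD rightpos ((0 : Int), (0 : Int))) then
          rightpos
        else childpos
      siftupLoop fuel (heap.set pos (heap.getD childpos ((0 : Int), (0 : Int)))) childpos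
    else (heap, pos)

-- heapq._siftup(heap, pos): descend, place newitem, sift it back down
def siftup (heap : List (Int × Int)) (pos : Nat) : List (Int × Int) :=
  let newitem := heap.getD pos ((0 : Int), (0 : Int))
  let r := siftupLoop heap.length heap pos
  siftdownLoop r.2 (r.1.set r.2 newitem) pos r.2 newitem

-- heapq.heappop (A only calls it on a non-empty heap; on [] Python raises IndexError,
-- unreachable here, and this port returns a dummy)
def heappop (heap : List (Int × Int)) : (Int × Int) × List (Int × Int) :=
  let lastelt := heap.getD (heap.length - 1) ((0 : Int), (0 : Int))
  let rest := heap.dropLast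
  if rest.isEmpty then (lastelt, rest)
  else (rest.getD 0 ((0 : Int), (0 : Int)), siftup (rest.set 0 lastelt) 0)

-- the while-loop of A: pq, food_len, prev, k are the loop state; `fuel` bounds the
-- iteration count (each heappop shrinks pq, so pq.length iterations suffice)
def solutionLoop (fuel : Nat) (pq : List (Int × Int)) (foodLen prev k : Int) : Int :=
  match fuel with
  | 0 => -1
  | fuel + 1 =>
    if pq = [] then -1
    else
      let temp := ((pq.getD 0 ((0 : Int), (0 : Int))).1 - prev) * foodLen
      if k ≥ temp then
        let r := heappop pq
        solutionLoop fuel r.2 (foodLen - 1) r.1.1 (k - temp)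
      else
        -- sorted(pq, key=lambda x: x[1])[k % food_len][1]; the index is provably in range
        ((PySem.List.sorted pq (fun x => x.2)).getD (PySem.Int.mod k foodLen).toNat
          ((0 : Int), (0 : Int))).2

def solution (food_times : List Int) (k : Int) : Int :=
  let pq := food_times.zipIdx.foldl
    (fun pq iv => heappush pq (iv.1, (iv.2 : Int) + 1)) []
  solutionLoop pq.length pq (food_times.length : Int) 0 k

-- ===== PORT B =====
def solution_alt (food_times : List Int) (k : Int) : Int :=
  let n := food_times.length
  if n = 0 then -1
  else
    let times := PySem.List.sorted food_times (fun x => x)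
    -- S[j] = total seconds consumed by the first j exhausted foods, in closed form
    let p := (List.range n).foldl
      (fun (p : List Int × Int) j =>
        (p.1 ++ [p.2 + times.getD j 0 * ((n : Int) - (j : Int))], p.2 + times.getD j 0))
      ([0], 0)
    let S := p.1
    if k ≥ S.getD n 0 then -1
    else
      -- S[1..n] is nondecreasing, so the break point is a count, not a scan with state
      let j := (List.range n).countP (fun i => decide (S.getD (i + 1) 0 ≤ k))
      let t := times.getD j 0
      let skip : Int := (j : Int) - (((PySem.List.index? times t).getD 0 : Nat) : Int)
      let r := PySem.Int.mod (k - S.getD j 0) ((n : Int) - (j : Int))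
      let survivors := (food_times.zipIdx.foldl
        (fun (st : Int × List Int) iv =>
          if t < iv.1 then (st.1, st.2 ++ [(iv.2 : Int) + 1])
          else if iv.1 = t then
            (if 0 < st.1 then (st.1 - 1, st.2) else (st.1, st.2 ++ [(iv.2 : Int) + 1]))
          else st)
        (skip, [])).2
      -- survivors[r]: r is provably in range (see proofs below), so getD never defaults
      survivors.getD r.toNat 0

-- ===== PRECONDITION & SPEC =====
def Spec_solution (food_times : List Int) (k : Int) (out : Int) : Prop := out = solution_alt food_times k
instance (food_times : List Int) (k : Int) (out : Int) : Decidable (Spec_solution food_times k out) := by unfold Spec_solution; infer_instance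

-- ===== CLAIM (what is proved, stated in full; the proofs are below) =====
def Claim_equal_solution : Prop := ∀ (food_times : List Int) (k : Int), Dom_solution food_times k → Spec_solution food_times k (solution food_times k)

-- ===== LEMMAS AND PROOFS =====

theorem siftupLoop_length : ∀ (fuel : Nat) (l : List (Int × Int)) (p : Nat),
    (siftupLoop fuel l p).1.length = l.length := by
  intro fuel
  induction fuel with
  | zero => intro l p; rfl
  | succ f ih =>
      intro l p
      rw [siftupLoop]
      dsimp only
      split
      · rw [ih]; simp
      · rfl

-- Order facts about Python's tuple comparison
theorem pyLt_eq_true_iff (a b : Int × Int) :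
    pyLt a b = true ↔ (a.1 < b.1 ∨ (a.1 = b.1 ∧ a.2 < b.2)) := by
  simp [pyLt]

theorem pyLt_eq_false_iff (a b : Int × Int) :
    pyLt a b = false ↔ (b.1 < a.1 ∨ (b.1 = a.1 ∧ b.2 ≤ a.2)) := by
  rw [← Bool.not_eq_true, pyLt_eq_true_iff]; omega

theorem pyLe_refl (a : Int × Int) : pyLt a a = false := by
  rw [pyLt_eq_false_iff]; omega

theorem pyLe_trans {a b c : Int × Int} (h1 : pyLt b a = false) (h2 : pyLt c b = false) :
    pyLt c a = false := by
  rw [pyLt_eq_false_iff] at *; omega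

theorem pyLe_antisymm {a b : Int × Int} (h1 : pyLt a b = false) (h2 : pyLt b a = false) :
    a = b := by
  rw [pyLt_eq_false_iff] at *
  exact Prod.ext (by omega) (by omega)

theorem pyLt_asymm {a b : Int × Int} (h : pyLt a b = true) : pyLt b a = false := by
  rw [pyLt_eq_true_iff] at h; rw [pyLt_eq_false_iff]; omega

theorem pyLt_le {a b c : Int × Int} (h1 : pyLt a b = true) (h2 : pyLt c b = false) :
    pyLt c a = false := by
  rw [pyLt_eq_true_iff] at h1; rw [pyLt_eq_false_iff] at *; omega

-- getD glue
theorem getD_set_self (l : List (Int × Int)) (i : Nat) (x d : Int × Int) (h : i < l.length) :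
    (l.set i x).getD i d = x := by
  simp [List.getD, h]

theorem getD_set_ne (l : List (Int × Int)) (i j : Nat) (x d : Int × Int) (h : i ≠ j) :
    (l.set i x).getD j d = l.getD j d := by
  simp [List.getD, List.getElem?_set_ne h]

-- the binary-heap invariant heapq maintains (parent ≤ child at every edge)
def HInv (h : List (Int × Int)) : Prop :=
  ∀ i : Nat, 0 < i → i < h.length →
    pyLt (h.getD i ((0 : Int), (0 : Int))) (h.getD ((i - 1) / 2) ((0 : Int), (0 : Int))) = false

-- edges of the heap hold except those touching position `pos` (the hole)
def EdgesExcept (h : List (Int × Int)) (pos : Nat) : Prop :=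
  ∀ i : Nat, 0 < i → i < h.length → i ≠ pos → (i - 1) / 2 ≠ pos →
    pyLt (h.getD i ((0 : Int), (0 : Int))) (h.getD ((i - 1) / 2) ((0 : Int), (0 : Int))) = false

-- children of the hole are ≥ the hole's parent
def Bridge (h : List (Int × Int)) (pos : Nat) : Prop :=
  0 < pos → ∀ c : Nat, c < h.length → (c - 1) / 2 = pos →
    pyLt (h.getD c ((0 : Int), (0 : Int))) (h.getD ((pos - 1) / 2) ((0 : Int), (0 : Int))) = false

theorem hinv_le_root (h : List (Int × Int)) (hh : HInv h) :
    ∀ i : Nat, i < h.length →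
      pyLt (h.getD i ((0 : Int), (0 : Int))) (h.getD 0 ((0 : Int), (0 : Int))) = false := by
  intro i
  induction i using Nat.strong_induction_on with
  | _ i ih =>
    intro hi
    rcases Nat.eq_zero_or_pos i with h0 | h0
    · subst h0; exact pyLe_refl _
    · exact pyLe_trans (ih ((i - 1) / 2) (by omega) (by omega)) (hh i h0 hi)

-- writing `x` into the hole `i` after parking `l[j]` there permutes `l.set i x`
theorem set_swap_perm (l : List (Int × Int)) (i j : Nat) (x : Int × Int)
    (hi : i < l.length) (hj : j < l.length) (hij : i ≠ j) :
    ((l.set i (l.getD j ((0 : Int), (0 : Int)))).set j x).Perm (l.set i x) := by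
  have hiL : i < (l.set i x).length := by simpa using hi
  have hjL : j < (l.set i x).length := by simpa using hj
  have hp := List.set_set_perm (as := l.set i x) (i := i) (j := j) hiL hjL
  rw [List.set_set, List.getElem_set_ne (by omega), List.getElem_set_self] at hp
  rwa [List.getD_eq_getElem _ _ hj]

theorem siftdownLoop_perm : ∀ (fuel : Nat) (h : List (Int × Int)) (s pos : Nat)
    (item : Int × Int), pos < h.length → pos ≤ fuel →
    (siftdownLoop fuel h s pos item).Perm (h.set pos item) := by
  intro fuel
  induction fuel with
  | zero =>
      intro h s pos item hpos hf
      have : pos = 0 := by omega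
      subst this
      exact List.Perm.refl _
  | succ f ih =>
      intro h s pos item hpos hf
      rw [siftdownLoop]
      split
      · dsimp only
        split
        · rename_i hsp hlt
          refine (ih _ _ _ _ (by simp; omega) (by omega)).trans ?_
          exact set_swap_perm h pos ((pos - 1) / 2) item hpos (by omega) (by omega)
        · exact List.Perm.refl _
      · exact List.Perm.refl _

theorem siftupLoop_perm : ∀ (fuel : Nat) (h : List (Int × Int)) (pos : Nat),
    pos < h.length → h.length ≤ fuel + pos → ∀ x : Int × Int,
    ((siftupLoop fuel h pos).1.set (siftupLoop fuel h pos).2 x).Perm (h.set pos x) := by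
  intro fuel
  induction fuel with
  | zero =>
      intro h pos hpos hf x
      exact absurd hpos (by omega)
  | succ f ih =>
      intro l p hpos hf x
      rw [siftupLoop]
      dsimp only
      split
      · rename_i hc
        split
        · rename_i hco
          have h1 := (Bool.and_eq_true_iff.mp hco).1
          have hlt : 2 * p + 1 + 1 < l.length := by simpa using h1
          refine (ih _ _ (by simpa using hlt) (by simp; omega) x).trans ?_
          exact set_swap_perm l p (2 * p + 1 + 1) x hpos hlt (by omega)
        · refine (ih _ _ (by simpa using hc) (by simp; omega) x).trans ?_
          exact set_swap_perm l p (2 * p + 1) x hpos hc (by omega)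
      · exact List.Perm.refl _

theorem siftdownLoop_hinv (item : Int × Int) : ∀ (fuel pos : Nat) (h : List (Int × Int)),
    pos < h.length → pos ≤ fuel →
    (∀ i : Nat, 0 < i → i < h.length → i ≠ pos →
      pyLt ((h.set pos item).getD i ((0 : Int), (0 : Int)))
        ((h.set pos item).getD ((i - 1) / 2) ((0 : Int), (0 : Int))) = false) →
    (0 < pos → ∀ c : Nat, c < h.length → (c - 1) / 2 = pos →
      pyLt ((h.set pos item).getD c ((0 : Int), (0 : Int)))
        ((h.set pos item).getD ((pos - 1) / 2) ((0 : Int), (0 : Int))) = false) →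
    HInv (siftdownLoop fuel h 0 pos item) := by
  intro fuel
  induction fuel with
  | zero =>
      intro pos h hpos hf ha hb
      have : pos = 0 := by omega
      subst this
      intro i hi0 hilen
      rw [siftdownLoop] at hilen ⊢
      rw [List.length_set] at hilen
      exact ha i hi0 hilen (by omega)
  | succ f ih =>
    intro pos h hpos hf ha hb
    rw [siftdownLoop]
    split
    · dsimp only
      rename_i hsp
      have hpp : (pos - 1) / 2 < h.length := by omega
      have hppne : (pos - 1) / 2 ≠ pos := by omega
      -- values of the working array with the hole at pos
      have gat : ∀ x, x ≠ pos → (h.set pos item).getD x ((0:Int),(0:Int)) = h.getD x ((0:Int),(0:Int)) := by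
        intro x hx; rw [getD_set_ne _ _ _ _ _ (fun e => hx e.symm)]
      have gpos : (h.set pos item).getD pos ((0:Int),(0:Int)) = item := getD_set_self _ _ _ _ hpos
      split
      · rename_i hlt
        -- bubbling step: parent moves down to pos, hole moves to parentpos
        apply ih ((pos - 1) / 2) _ (by simpa using hpp) (by omega)
        · -- edges except the one into the new hole
          intro i hi0 hilen hine
          rw [List.length_set] at hilen
          have g'at : ∀ x, x ≠ pos → x ≠ (pos - 1) / 2 →
              ((h.set pos (h.getD ((pos-1)/2) ((0:Int),(0:Int)))).set ((pos-1)/2) item).getD x ((0:Int),(0:Int))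
                = h.getD x ((0:Int),(0:Int)) := by
            intro x hx1 hx2
            rw [getD_set_ne _ _ _ _ _ (fun e => hx2 e.symm), getD_set_ne _ _ _ _ _ (fun e => hx1 e.symm)]
          have g'pos : ((h.set pos (h.getD ((pos-1)/2) ((0:Int),(0:Int)))).set ((pos-1)/2) item).getD pos ((0:Int),(0:Int))
              = h.getD ((pos-1)/2) ((0:Int),(0:Int)) := by
            rw [getD_set_ne _ _ _ _ _ hppne, getD_set_self _ _ _ _ hpos]
          have g'pp : ((h.set pos (h.getD ((pos-1)/2) ((0:Int),(0:Int)))).set ((pos-1)/2) item).getD ((pos-1)/2) ((0:Int),(0:Int))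
              = item := getD_set_self _ _ _ _ (by simpa using hpp)
          by_cases hip : i = pos
          · subst hip
            rw [g'pos, g'pp]
            exact pyLt_asymm hlt
          · by_cases hpar_pos : (i - 1) / 2 = pos
            · rw [g'at i hip (by omega), hpar_pos, g'pos]
              have := hb hsp i hilen hpar_pos
              rwa [gat i hip, gat ((pos-1)/2) hppne] at this
            · by_cases hpar_pp : (i - 1) / 2 = (pos - 1) / 2
              · rw [g'at i hip (by omega), hpar_pp, g'pp]
                have h1 := ha i hi0 hilen hip
                rw [gat i hip, hpar_pp, gat ((pos-1)/2) hppne] at h1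
                exact pyLt_le hlt h1
              · rw [g'at i hip (by omega), g'at ((i-1)/2) hpar_pos hpar_pp]
                have h1 := ha i hi0 hilen hip
                rwa [gat i hip, gat ((i-1)/2) hpar_pos] at h1
        · -- bridge at the new hole
          intro hpp0 c hclen hcpar
          rw [List.length_set] at hclen
          have g'at : ∀ x, x ≠ pos → x ≠ (pos - 1) / 2 →
              ((h.set pos (h.getD ((pos-1)/2) ((0:Int),(0:Int)))).set ((pos-1)/2) item).getD x ((0:Int),(0:Int))
                = h.getD x ((0:Int),(0:Int)) := by
            intro x hx1 hx2
            rw [getD_set_ne _ _ _ _ _ (fun e => hx2 e.symm), getD_set_ne _ _ _ _ _ (fun e => hx1 e.symm)]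
          have g'pos : ((h.set pos (h.getD ((pos-1)/2) ((0:Int),(0:Int)))).set ((pos-1)/2) item).getD pos ((0:Int),(0:Int))
              = h.getD ((pos-1)/2) ((0:Int),(0:Int)) := by
            rw [getD_set_ne _ _ _ _ _ hppne, getD_set_self _ _ _ _ hpos]
          have hgp : ((pos-1)/2 - 1) / 2 ≠ pos := by omega
          have hgp2 : ((pos-1)/2 - 1) / 2 ≠ (pos-1)/2 := by omega
          have hppe : pyLt (h.getD ((pos-1)/2) ((0:Int),(0:Int)))
              (h.getD (((pos-1)/2 - 1) / 2) ((0:Int),(0:Int))) = false := by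
            have h1 := ha ((pos-1)/2) hpp0 hpp hppne
            rwa [gat _ hppne, gat _ hgp] at h1
          by_cases hc : c = pos
          · subst hc
            rw [g'pos, g'at _ hgp hgp2]
            exact hppe
          · have hcne : c ≠ (pos - 1) / 2 := by omega
            rw [g'at c hc hcne, g'at _ hgp hgp2]
            have h1 := ha c (by omega) hclen hc
            rw [gat c hc, hcpar, gat _ hppne] at h1
            exact pyLe_trans hppe h1
      · rename_i hlt
        -- the item fits here: the array with item written at pos is a heap
        intro i hi0 hilen
        rw [List.length_set] at hilen
        by_cases hip : i = pos
        · subst hip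
          rw [gpos, gat _ hppne]
          simpa using hlt
        · exact ha i hi0 hilen hip
    · rename_i hsp
      have hp0 : pos = 0 := by omega
      subst hp0
      intro i hi0 hilen
      rw [List.length_set] at hilen
      exact ha i hi0 hilen (by omega)

-- one descent step of _siftup: moving the selected (minimal) child `cp2` of the hole `p`
-- up into the hole moves the hole down to `cp2`, preserving the two invariants
theorem heapStep_inv (l : List (Int × Int)) (p cp2 : Nat) (hpos : p < l.length)
    (hcp2lt : cp2 < l.length) (hchild : (cp2 - 1) / 2 = p) (hplt : p < cp2)
    (hmin : ∀ j, 0 < j → j < l.length → (j - 1) / 2 = p → j ≠ cp2 →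
      pyLt (l.getD j ((0:Int),(0:Int))) (l.getD cp2 ((0:Int),(0:Int))) = false)
    (ha : EdgesExcept l p) (hb : Bridge l p) :
    EdgesExcept (l.set p (l.getD cp2 ((0:Int),(0:Int)))) cp2 ∧
      Bridge (l.set p (l.getD cp2 ((0:Int),(0:Int)))) cp2 := by
  have gat : ∀ x, x ≠ p → (l.set p (l.getD cp2 ((0:Int),(0:Int)))).getD x ((0:Int),(0:Int))
      = l.getD x ((0:Int),(0:Int)) := by
    intro x hx; rw [getD_set_ne _ _ _ _ _ (fun e => hx e.symm)]
  have gp : (l.set p (l.getD cp2 ((0:Int),(0:Int)))).getD p ((0:Int),(0:Int))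
      = l.getD cp2 ((0:Int),(0:Int)) := getD_set_self _ _ _ _ hpos
  constructor
  · intro i hi0 hilen hine hpar
    rw [List.length_set] at hilen
    by_cases hip : i = p
    · subst hip
      rw [gp, gat _ (by omega)]
      exact hb (by omega) cp2 hcp2lt hchild
    · by_cases hpari : (i - 1) / 2 = p
      · rw [gat i hip, hpari, gp]
        exact hmin i hi0 hilen hpari hine
      · rw [gat i hip, gat _ hpari]
        exact ha i hi0 hilen hip hpari
  · intro _ c hclen hcpar
    rw [List.length_set] at hclen
    rw [hchild, gat c (by omega), gp]
    have h1 := ha c (by omega) hclen (by omega) (by rw [hcpar]; omega)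
    rwa [hcpar] at h1

theorem siftupLoop_inv : ∀ (fuel : Nat) (h : List (Int × Int)) (pos : Nat),
    pos < h.length → h.length ≤ fuel + pos → EdgesExcept h pos → Bridge h pos →
    (siftupLoop fuel h pos).2 < h.length ∧ h.length ≤ 2 * (siftupLoop fuel h pos).2 + 1 ∧
      EdgesExcept (siftupLoop fuel h pos).1 (siftupLoop fuel h pos).2 ∧
      Bridge (siftupLoop fuel h pos).1 (siftupLoop fuel h pos).2 := by
  intro fuel
  induction fuel with
  | zero =>
      intro h pos hpos hf ha hb
      exact absurd hpos (by omega)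
  | succ f ih =>
      intro l p hpos hf ha hb
      rw [siftupLoop]
      dsimp only
      split
      · rename_i hc
        split
        · rename_i hco
          have h1 : 2 * p + 1 + 1 < l.length := by
            simpa using (Bool.and_eq_true_iff.mp hco).1
          have h2 : pyLt (l.getD (2 * p + 1) ((0:Int),(0:Int)))
              (l.getD (2 * p + 1 + 1) ((0:Int),(0:Int))) = false := by
            simpa using (Bool.and_eq_true_iff.mp hco).2
          have hmin : ∀ j, 0 < j → j < l.length → (j - 1) / 2 = p → j ≠ 2 * p + 1 + 1 →
              pyLt (l.getD j ((0:Int),(0:Int))) (l.getD (2 * p + 1 + 1) ((0:Int),(0:Int))) = false := by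
            intro j hj0 hj hjp hjne
            have : j = 2 * p + 1 := by omega
            subst this
            exact h2
          obtain ⟨ha', hb'⟩ := heapStep_inv l p (2 * p + 1 + 1) hpos h1 (by omega) (by omega) hmin ha hb
          have hres := ih _ _ (by simpa using h1) (by simp; omega) ha' hb'
          rw [List.length_set] at hres
          exact hres
        · rename_i hco
          have h2 : 2 * p + 1 + 1 < l.length →
              pyLt (l.getD (2 * p + 1) ((0:Int),(0:Int)))
                (l.getD (2 * p + 1 + 1) ((0:Int),(0:Int))) = true := by
            intro hrp
            cases hpy : pyLt (l.getD (2 * p + 1) ((0:Int),(0:Int)))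
                (l.getD (2 * p + 1 + 1) ((0:Int),(0:Int)))
            · exact absurd (by rw [hpy]; simp [hrp]) hco
            · rfl
          have hmin : ∀ j, 0 < j → j < l.length → (j - 1) / 2 = p → j ≠ 2 * p + 1 →
              pyLt (l.getD j ((0:Int),(0:Int))) (l.getD (2 * p + 1) ((0:Int),(0:Int))) = false := by
            intro j hj0 hj hjp hjne
            have : j = 2 * p + 1 + 1 := by omega
            subst this
            exact pyLt_asymm (h2 hj)
          obtain ⟨ha', hb'⟩ := heapStep_inv l p (2 * p + 1) hpos hc (by omega) (by omega) hmin ha hb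
          have hres := ih _ _ (by simpa using hc) (by simp; omega) ha' hb'
          rw [List.length_set] at hres
          exact hres
      · rename_i hc
        exact ⟨hpos, by omega, ha, hb⟩

theorem set_append_len (l : List (Int × Int)) (a x : Int × Int) :
    ((l ++ [a]).set l.length x) = l ++ [x] := by
  rw [List.set_append]
  simp

theorem getD_dropLast (l : List (Int × Int)) (i : Nat) (h : i < l.length - 1) :
    l.dropLast.getD i ((0:Int),(0:Int)) = l.getD i ((0:Int),(0:Int)) := by
  rw [List.getD_eq_getElem _ _ (by simp; omega), List.getD_eq_getElem _ _ (by omega),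
    List.getElem_dropLast]

theorem heappush_perm (h : List (Int × Int)) (item : Int × Int) :
    (heappush h item).Perm (item :: h) := by
  unfold heappush
  refine (siftdownLoop_perm _ _ _ _ _ (by simp) (le_refl _)).trans ?_
  rw [set_append_len]
  exact List.perm_append_singleton item h

theorem heappush_hinv (h : List (Int × Int)) (item : Int × Int) (hh : HInv h) :
    HInv (heappush h item) := by
  unfold heappush
  apply siftdownLoop_hinv item h.length h.length (h ++ [item]) (by simp) (le_refl _)
  · intro i hi0 hilen hine
    rw [List.length_append] at hilen
    have hi : i < h.length := by simp at hilen; omega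
    rw [set_append_len]
    have e : ∀ x, x < h.length → (h ++ [item]).getD x ((0:Int),(0:Int)) = h.getD x ((0:Int),(0:Int)) := by
      intro x hx
      rw [List.getD_eq_getElem _ _ (by simp; omega), List.getD_eq_getElem _ _ hx,
        List.getElem_append_left hx]
    rw [e i hi, e _ (by omega)]
    exact hh i hi0 hi
  · intro hp0 c hclen hcpar
    rw [List.length_append] at hclen
    simp at hclen
    omega

theorem heappop_spec (h : List (Int × Int)) (hh : HInv h) (hne : h ≠ []) :
    (heappop h).1 = h.getD 0 ((0 : Int), (0 : Int)) ∧
      ((heappop h).1 :: (heappop h).2).Perm h ∧ HInv (heappop h).2 := by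
  have hlen0 : 0 < h.length := List.length_pos_of_ne_nil hne
  simp only [heappop]
  split
  · -- h has a single element
    rename_i hemp
    rw [List.isEmpty_iff] at hemp
    rcases h with _ | ⟨a, t⟩
    · simp at hne
    · rcases t with _ | ⟨b, t⟩
      · refine ⟨by simp [List.getD], by simp [List.getD], ?_⟩
        intro i hi0 hilen
        simp at hilen
      · simp at hemp
  · rename_i hemp
    rw [List.isEmpty_iff] at hemp
    have hlen2 : 2 ≤ h.length := by
      rcases h with _ | ⟨h0, t⟩
      · simp at hne
      · rcases t with _ | ⟨t0, t⟩
        · simp at hemp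
        · simp
    have hrlen : h.dropLast.length = h.length - 1 := by simp
    -- the array handed to _siftup: last element moved into the root hole
    set L := h.dropLast.set 0 (h.getD (h.length - 1) ((0:Int),(0:Int))) with hLdef
    have hbase : L.length = h.length - 1 := by rw [hLdef]; simp
    have ha : EdgesExcept L 0 := by
      intro i hi0 hilen hine hpar
      rw [hbase] at hilen
      rw [hLdef, getD_set_ne _ _ _ _ _ (by omega), getD_set_ne _ _ _ _ _ (by omega),
        getD_dropLast _ _ (by omega), getD_dropLast _ _ (by omega)]
      exact hh i hi0 (by omega)
    have hb : Bridge L 0 := by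
      intro h0; omega
    obtain ⟨hr2, hleaf, hEE, hBr⟩ :=
      siftupLoop_inv L.length L 0 (by omega) (by omega) ha hb
    have hr1len := siftupLoop_length L.length L 0
    have hnewitem : L.getD 0 ((0:Int),(0:Int)) = h.getD (h.length - 1) ((0:Int),(0:Int)) := by
      rw [hLdef]
      exact getD_set_self _ _ _ _ (by rw [hrlen]; omega)
    -- the popped heap is a permutation of the base array
    have hP : (siftup L 0).Perm L := by
      rw [siftup]
      rw [hnewitem]
      refine (siftdownLoop_perm _ _ _ _ _ (by simp only [List.length_set, hr1len]; omega)
        (le_refl _)).trans ?_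
      rw [List.set_set]
      refine (siftupLoop_perm _ _ 0 (by omega) (by omega) _).trans ?_
      rw [hLdef, List.set_set]
    refine ⟨getD_dropLast h 0 (by omega), ?_, ?_⟩
    · -- root :: popped-heap is a permutation of the original heap
      rcases h with _ | ⟨a, t⟩
      · simp at hne
      · have ht : t ≠ [] := by
          intro e; subst e; simp at hemp
        have e1 : (a :: t).dropLast = a :: t.dropLast := List.dropLast_cons_of_ne_nil ht
        have e2 : (a :: t).getD ((a :: t).length - 1) ((0:Int),(0:Int)) = t.getLast ht := by
          rw [List.getD_eq_getElem _ _ (by simp)]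
          simp only [List.length_cons, Nat.add_sub_cancel]
          rw [List.getElem_cons]
          simp [ht, List.getLast_eq_getElem]
        have hLt : L.Perm t := by
          rw [hLdef, e1, e2, List.set_cons_zero]
          conv_rhs => rw [← List.dropLast_concat_getLast ht]
          exact (List.perm_append_singleton _ _).symm
        rw [e1]
        have e3 : (a :: t.dropLast).getD 0 ((0:Int),(0:Int)) = a := by simp [List.getD]
        rw [e3]
        exact List.Perm.cons a (hP.trans hLt)
    · -- the popped heap satisfies the invariant again
      show HInv (siftup L 0)
      rw [siftup]
      rw [hnewitem]
      apply siftdownLoop_hinv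
      · simp only [List.length_set, hr1len]; omega
      · exact le_refl _
      · intro i hi0 hilen hine
        simp only [List.length_set, hr1len] at hilen
        have hpar : (i - 1) / 2 ≠ (siftupLoop L.length L 0).2 := by
          intro e
          omega
        rw [List.set_set, getD_set_ne _ _ _ _ _ (fun e => hine e.symm),
          getD_set_ne _ _ _ _ _ (fun e => hpar e.symm)]
        exact hEE i hi0 (by rw [hr1len]; omega) hine hpar
      · intro hpos0 c hclen hcpar
        simp only [List.length_set, hr1len] at hclen
        omega

theorem root_eq_head (pq tl : List (Int × Int)) (r : Int × Int) (hh : HInv pq)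
    (hp : pq.Perm (r :: tl)) (hs : (r :: tl).Pairwise (fun a b => pyLt b a = false)) :
    pq.getD 0 ((0 : Int), (0 : Int)) = r := by
  have hne : pq ≠ [] := by
    intro e; subst e
    have := hp.length_eq; simp at this
  have hlen : 0 < pq.length := List.length_pos_of_ne_nil hne
  have hroot_mem : pq.getD 0 ((0:Int),(0:Int)) ∈ pq := by
    rw [List.getD_eq_getElem _ _ hlen]; exact List.getElem_mem _
  have hmin : ∀ y ∈ pq, pyLt y (pq.getD 0 ((0:Int),(0:Int))) = false := by
    intro y hy
    obtain ⟨i, hi, rfl⟩ := List.mem_iff_getElem.mp hy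
    rw [← List.getD_eq_getElem _ ((0:Int),(0:Int)) hi]
    exact hinv_le_root pq hh i hi
  have h1 : pyLt r (pq.getD 0 ((0:Int),(0:Int))) = false :=
    hmin r (hp.mem_iff.mpr (List.mem_cons_self))
  rcases List.mem_cons.mp (hp.mem_iff.mp hroot_mem) with he | htl
  · exact he
  · have h2 : pyLt (pq.getD 0 ((0:Int),(0:Int))) r = false := (List.pairwise_cons.mp hs).1 _ htl
    exact pyLe_antisymm h2 h1

theorem pairwise_snd_lt (l : List (Int × Int))
    (h1 : l.Pairwise (fun a b => a.2 ≤ b.2)) (h2 : (l.map Prod.snd).Nodup) :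
    l.Pairwise (fun a b => a.2 < b.2) := by
  rw [List.Nodup, List.pairwise_map] at h2
  exact (h1.and h2).imp (fun h => lt_of_le_of_ne h.1 h.2)

theorem sorted_snd_eq (pq rest : List (Int × Int)) (hp : pq.Perm rest)
    (hnd : (rest.map Prod.snd).Nodup) :
    PySem.List.sorted pq (fun x => x.2) = PySem.List.sorted rest (fun x => x.2) := by
  apply PySem.List.sorted_eq_of_perm_of_pairwise_lt
  · exact (PySem.List.sorted_perm rest _ false).trans hp.symm
  · apply pairwise_snd_lt
    · exact PySem.List.sorted_pairwise rest _
    · exact ((PySem.List.sorted_perm rest _ false).map Prod.snd).nodup_iff.mpr hnd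

theorem buildHeap_perm : ∀ (l : List (Int × Nat)) (acc : List (Int × Int)),
    (l.foldl (fun pq iv => heappush pq (iv.1, (iv.2 : Int) + 1)) acc).Perm
      (acc ++ l.map (fun iv => (iv.1, (iv.2 : Int) + 1))) := by
  intro l
  induction l with
  | nil => intro acc; simp
  | cons hd tl ih =>
      intro acc
      simp only [List.foldl_cons, List.map_cons]
      refine (ih _).trans ?_
      refine ((heappush_perm acc (hd.1, (hd.2 : Int) + 1)).append_right _).trans ?_
      exact List.perm_middle.symm

theorem buildHeap_hinv : ∀ (l : List (Int × Nat)) (acc : List (Int × Int)), HInv acc →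
    HInv (l.foldl (fun pq iv => heappush pq (iv.1, (iv.2 : Int) + 1)) acc) := by
  intro l
  induction l with
  | nil => intro acc hacc; exact hacc
  | cons hd tl ih =>
      intro acc hacc
      exact ih _ (heappush_hinv acc _ hacc)

theorem insertBy_pw (x : Int × Int) : ∀ (ys : List (Int × Int)),
    ys.Pairwise (fun a b => pyLt b a = false) →
    (PySem.List.insertBy pyLt x ys).Pairwise (fun a b => pyLt b a = false) := by
  intro ys
  induction ys with
  | nil => intro _; simp [PySem.List.insertBy]
  | cons y ys ih =>
      intro h
      obtain ⟨hy, hys⟩ := List.pairwise_cons.mp h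
      rw [PySem.List.insertBy]
      by_cases hb : pyLt x y = true
      · rw [if_pos hb]
        refine List.pairwise_cons.mpr ⟨?_, h⟩
        intro z hz
        rcases List.mem_cons.mp hz with rfl | hz2
        · exact pyLt_asymm hb
        · exact pyLt_le hb (hy z hz2)
      · rw [if_neg hb]
        refine List.pairwise_cons.mpr ⟨?_, ih hys⟩
        intro z hz
        rcases (PySem.List.mem_insertBy pyLt x z ys).mp hz with rfl | hz2
        · simpa using hb
        · exact hy z hz2

theorem foldl_insertBy_pw (xs : List (Int × Int)) : ∀ (acc : List (Int × Int)),
    acc.Pairwise (fun a b => pyLt b a = false) →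
    (xs.foldl (fun acc x => PySem.List.insertBy pyLt x acc) acc).Pairwise
      (fun a b => pyLt b a = false) := by
  induction xs with
  | nil => intro acc h; exact h
  | cons x xs ih => intro acc h; exact ih _ (insertBy_pw x acc h)

theorem sorted2_pairwise_lex (xs : List (Int × Int)) :
    (PySem.List.sorted2 xs Prod.fst Prod.snd).Pairwise (fun a b => pyLt b a = false) := by
  have hbef : (fun a b : Int × Int =>
      (decide (Prod.fst a < Prod.fst b) ||
        (!decide (Prod.fst b < Prod.fst a) && decide (Prod.snd a < Prod.snd b)))) = pyLt := by
    funext a b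
    rw [Bool.eq_iff_iff]
    simp [pyLt]
    omega
  have : PySem.List.sorted2 xs Prod.fst Prod.snd
      = xs.foldl (fun acc x => PySem.List.insertBy pyLt x acc) [] := by
    simp only [PySem.List.sorted2]
    rw [if_neg (by simp)]
    rw [hbef]
  rw [this]
  exact foldl_insertBy_pw xs [] (by simp)

-- B-side reference objects: the pairs list, its lex sort, prefix sums
def pairsOf (ft : List Int) : List (Int × Int) :=
  ft.zipIdx.map (fun iv => (iv.1, (iv.2 : Int) + 1))

def LSof (ft : List Int) : List (Int × Int) :=
  PySem.List.sorted2 (pairsOf ft) Prod.fst Prod.snd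

-- the reference form of A's loop: a scan over the suffices of the lex-sorted pairs list
def altLoop (rest : List (Int × Int)) (prev k : Int) : Int :=
  match rest with
  | [] => -1
  | (t, i) :: tl =>
    let remaining : Int := (((t, i) :: tl).length : Int)
    let temp := (t - prev) * remaining
    if k < temp then
      ((PySem.List.sorted ((t, i) :: tl) (fun x => x.2)).getD
        (PySem.Int.mod k remaining).toNat ((0 : Int), (0 : Int))).2
    else altLoop tl t (k - temp)

theorem loop_eq : ∀ (rest : List (Int × Int)) (fuel : Nat) (pq : List (Int × Int))
    (prev k : Int), pq.Perm rest → HInv pq →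
    rest.Pairwise (fun a b => pyLt b a = false) → (rest.map Prod.snd).Nodup →
    rest.length ≤ fuel →
    solutionLoop fuel pq (rest.length : Int) prev k = altLoop rest prev k := by
  intro rest
  induction rest with
  | nil =>
      intro fuel pq prev k hp _ _ _ _
      have : pq = [] := hp.eq_nil
      subst this
      cases fuel <;> simp [solutionLoop, altLoop]
  | cons r tl ih =>
      obtain ⟨rt, ri⟩ := r
      intro fuel pq prev k hp hh hs hnd hf
      cases fuel with
      | zero => simp at hf
      | succ f =>
        have hne : pq ≠ [] := by
          intro e; subst e
          have := hp.length_eq; simp at this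
        have hroot : pq.getD 0 ((0:Int),(0:Int)) = (rt, ri) := root_eq_head pq tl _ hh hp hs
        rw [solutionLoop]
        rw [if_neg hne]
        conv_rhs => rw [altLoop]
        rw [hroot]
        simp only
        by_cases hk : k < (rt - prev) * (((rt, ri) :: tl).length : Int)
        · rw [if_neg (not_le.mpr hk), if_pos hk, sorted_snd_eq pq ((rt, ri) :: tl) hp hnd]
        · rw [if_pos (not_lt.mp hk), if_neg hk]
          obtain ⟨h1, h2, h3⟩ := heappop_spec pq hh hne
          rw [h1, hroot] at h2 ⊢
          have hperm2 : (heappop pq).2.Perm tl := (h2.trans hp).cons_inv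
          have hlen : ((((rt, ri) :: tl).length : Int) - 1) = (tl.length : Int) := by
            simp
          rw [hlen]
          exact ih _ _ _ _ hperm2 h3 (List.pairwise_cons.mp hs).2
            (List.nodup_cons.mp (by simpa using hnd)).2 (by simp at hf ⊢; omega)

theorem pairsOf_snd_nodup (ft : List Int) : ((pairsOf ft).map Prod.snd).Nodup := by
  rw [pairsOf, List.map_map]
  have : (Prod.snd ∘ fun iv : Int × Nat => (iv.1, (iv.2 : Int) + 1))
      = (fun n : Nat => (n : Int) + 1) ∘ Prod.snd := rfl
  rw [this, ← List.map_map, List.zipIdx_map_snd]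
  apply List.Nodup.map
  · intro a b hab
    simpa using hab
  · exact List.nodup_range'

theorem solution_eq_ref : ∀ (food_times : List Int) (k : Int),
    solution food_times k = altLoop (LSof food_times) 0 k := by
  intro ft k
  rw [solution, LSof]
  have h1 := buildHeap_perm ft.zipIdx []
  rw [List.nil_append] at h1
  have h2 := buildHeap_hinv ft.zipIdx [] (by intro i hi0 hilen; simp at hilen)
  have h3 := PySem.List.sorted2_perm (ft.zipIdx.map (fun iv => (iv.1, (iv.2 : Int) + 1)))
    Prod.fst Prod.snd false
  rw [pairsOf] at *
  have hperm := h1.trans h3.symm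
  have hpw := sorted2_pairwise_lex (ft.zipIdx.map (fun iv => (iv.1, (iv.2 : Int) + 1)))
  have hnd : ((PySem.List.sorted2 (ft.zipIdx.map (fun iv => (iv.1, (iv.2 : Int) + 1)))
      Prod.fst Prod.snd).map Prod.snd).Nodup :=
    (h3.map Prod.snd).nodup_iff.mpr (by have := pairsOf_snd_nodup ft; rwa [pairsOf] at this)
  have hlen : (ft.length : Int) = ((PySem.List.sorted2
      (ft.zipIdx.map (fun iv => (iv.1, (iv.2 : Int) + 1))) Prod.fst Prod.snd).length : Int) := by
    rw [h3.length_eq]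
    simp
  rw [hlen]
  exact loop_eq _ _ _ 0 k hperm h2 hpw hnd (Nat.le_of_eq hperm.length_eq.symm)

-- ===== new B-side machinery =====

def prevAt (times : List Int) (j : Nat) : Int :=
  if j = 0 then 0 else times.getD (j - 1) 0
def presum (times : List Int) (j : Nat) : Int := (times.take j).sum
def Sv (times : List Int) (n j : Nat) : Int :=
  if j = 0 then 0
  else presum times (j - 1) + times.getD (j - 1) 0 * ((n : Int) - ((j - 1 : Nat) : Int))
theorem presum_succ (times : List Int) (m : Nat) :
    presum times (m + 1) = presum times m + times.getD m 0 := by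
  simp [presum, List.take_add_one, List.getD]
  cases h : times[m]? <;> simp

theorem Sv_step (times : List Int) (n j : Nat) (hj : j < n) :
    Sv times n (j + 1) = Sv times n j + (times.getD j 0 - prevAt times j) * ((n : Int) - (j : Nat)) := by
  rcases Nat.eq_zero_or_pos j with rfl | hj0
  · simp [Sv, prevAt, presum]
  · obtain ⟨m, rfl⟩ : ∃ m, j = m + 1 := ⟨j - 1, by omega⟩
    simp only [Sv, prevAt, if_neg (by omega : ¬ m + 1 + 1 = 0), if_neg (by omega : ¬ m + 1 = 0),
      Nat.add_sub_cancel, presum_succ]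
    push_cast
    ring

theorem Sv_mono (times : List Int) (n : Nat) (hlen : times.length = n)
    (hpw : times.Pairwise (fun a b => a ≤ b)) :
    ∀ i j : Nat, 1 ≤ i → i ≤ j → j ≤ n → Sv times n i ≤ Sv times n j := by
  have step : ∀ j : Nat, 1 ≤ j → j < n → Sv times n j ≤ Sv times n (j + 1) := by
    intro j hj1 hjn
    rw [Sv_step times n j hjn]
    have hle : times.getD (j - 1) 0 ≤ times.getD j 0 := by
      rw [List.getD_eq_getElem _ _ (by omega), List.getD_eq_getElem _ _ (by omega)]
      exact List.pairwise_iff_getElem.mp hpw (j-1) j (by omega) (by omega) (by omega)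
    have : 0 ≤ (times.getD j 0 - prevAt times j) * ((n : Int) - (j : Nat)) := by
      apply mul_nonneg
      · simp only [prevAt, if_neg (by omega : ¬ j = 0)]; omega
      · have : (j : Int) < n := by exact_mod_cast hjn
        omega
    omega
  intro i j hi hij hjn
  induction j with
  | zero => omega
  | succ m ih =>
      rcases Nat.lt_or_ge i (m+1) with h | h
      · exact le_trans (ih (by omega) (by omega)) (step m (by omega) (by omega))
      · have : i = m + 1 := by omega
        subst this; rfl

theorem fold_S (times : List Int) (n : Nat) : ∀ m : Nat,
    (List.range m).foldl
      (fun (p : List Int × Int) j =>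
        (p.1 ++ [p.2 + times.getD j 0 * ((n : Int) - (j : Int))], p.2 + times.getD j 0))
      ([0], 0)
    = ((List.range (m + 1)).map (fun j => Sv times n j), presum times m) := by
  intro m
  induction m with
  | zero => simp [Sv, presum]
  | succ m ih =>
      rw [List.range_succ, List.foldl_append, ih]
      conv_rhs => rw [List.range_succ]
      simp only [List.foldl_cons, List.foldl_nil, List.map_append, List.map_cons, List.map_nil]
      have h1 : presum times m + times.getD m 0 * ((n : Int) - (m : Int)) = Sv times n (m + 1) := by
        simp only [Sv, if_neg (by omega : ¬ m + 1 = 0), Nat.add_sub_cancel]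
      rw [h1, ← presum_succ]

theorem cnt_lt_range : ∀ (n m : Nat), m ≤ n →
    (List.range n).countP (fun i => decide (i < m)) = m := by
  intro n
  induction n with
  | zero => intro m h; interval_cases m; simp
  | succ n ih =>
      intro m h
      rw [List.range_succ, List.countP_append]
      rcases Nat.lt_or_ge n m with hm | hm
      · have : m = n + 1 := by omega
        subst this
        rw [List.countP_eq_length.mpr (by intro a ha; simp at ha ⊢; omega)]
        simp
      · rw [ih m hm]
        simp; omega

theorem countP_split {α : Type} (p q : α → Bool) : ∀ l : List α,
    l.countP p = l.countP (fun a => p a && q a) + l.countP (fun a => p a && !q a) := by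
  intro l
  induction l with
  | nil => simp
  | cons x l ih =>
      simp only [List.countP_cons, ih]
      cases hp : p x <;> cases hq : q x <;> simp <;> omega

theorem pairsOf_pairwise_snd (ft : List Int) :
    (pairsOf ft).Pairwise (fun a b => a.2 < b.2) := by
  rw [pairsOf, List.pairwise_map, List.pairwise_iff_getElem]
  intro i j hi hj hij
  simp only [List.getElem_zipIdx]
  simp
  omega

theorem pairsOf_nodup (ft : List Int) : (pairsOf ft).Nodup := by
  have h := pairsOf_pairwise_snd ft
  exact h.imp (fun hab e => by rw [e] at hab; exact absurd hab (lt_irrefl _))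

theorem LS_perm (ft : List Int) : (LSof ft).Perm (pairsOf ft) :=
  PySem.List.sorted2_perm _ _ _ _

theorem LS_nodup (ft : List Int) : (LSof ft).Nodup :=
  ((LS_perm ft).nodup_iff).mpr (pairsOf_nodup ft)

theorem LS_pairwise_strict (ft : List Int) :
    (LSof ft).Pairwise (fun a b => pyLt a b = true) := by
  have h1 := sorted2_pairwise_lex (pairsOf ft)
  have h2 : (LSof ft).Nodup := LS_nodup ft
  rw [LSof] at h2 ⊢
  exact (h1.and h2).imp (fun ⟨hle, hne⟩ => by
    rw [pyLt_eq_false_iff] at hle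
    rw [pyLt_eq_true_iff]
    rcases hle with h | h
    · left; exact h
    · right
      exact ⟨h.1, lt_of_le_of_ne h.2 (fun e => hne (Prod.ext h.1 e))⟩)

theorem strict_countP_lt (LS : List (Int × Int))
    (hst : LS.Pairwise (fun a b => pyLt a b = true)) (m : Nat) (hm : m < LS.length)
    (v : Int × Int) (hv : LS[m] = v) :
    LS.countP (fun y => pyLt y v) = m := by
  have hpg := List.pairwise_iff_getElem.mp hst
  have e : LS = LS.take m ++ LS[m] :: LS.drop (m + 1) := by
    rw [← List.drop_eq_getElem_cons hm, List.take_append_drop]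
  conv_lhs => rw [e]
  rw [List.countP_append, List.countP_cons]
  have h1 : (LS.take m).countP (fun y => pyLt y v) = m := by
    rw [List.countP_eq_length.mpr, List.length_take]
    · omega
    · intro a ha
      obtain ⟨i, hi, rfl⟩ := List.mem_iff_getElem.mp ha
      rw [List.length_take] at hi
      rw [List.getElem_take, ← hv]
      exact hpg i m (by omega) hm (by omega)
  have h2 : (LS.drop (m+1)).countP (fun y => pyLt y v) = 0 := by
    rw [List.countP_eq_zero]
    intro a ha
    obtain ⟨i, hi, rfl⟩ := List.mem_iff_getElem.mp ha
    rw [List.getElem_drop, ← hv]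
    simp only [List.length_drop] at hi
    have := hpg m (m+1+i) hm (by omega) (by omega)
    simp [pyLt_asymm this]
  rw [h1, h2, hv, pyLe_refl]
  simp

theorem mem_drop_iff_rank (ft : List Int) (j : Nat) (x : Int × Int) (hx : x ∈ pairsOf ft) :
    x ∈ (LSof ft).drop j ↔ j ≤ (pairsOf ft).countP (fun y => pyLt y x) := by
  have hcnt : (pairsOf ft).countP (fun y => pyLt y x) = (LSof ft).countP (fun y => pyLt y x) :=
    ((LS_perm ft).countP_eq _).symm
  rw [hcnt]
  constructor
  · intro h
    obtain ⟨i, hi, he⟩ := List.mem_iff_getElem.mp h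
    rw [List.getElem_drop] at he
    rw [List.length_drop] at hi
    subst he
    rw [strict_countP_lt _ (LS_pairwise_strict ft) _ (by omega) _ rfl]
    omega
  · intro h
    have hxLS : x ∈ LSof ft := (LS_perm ft).mem_iff.mpr hx
    obtain ⟨m, hm, he⟩ := List.mem_iff_getElem.mp hxLS
    subst he
    rw [strict_countP_lt _ (LS_pairwise_strict ft) _ hm _ rfl] at h
    apply List.mem_iff_getElem.mpr
    exact ⟨m - j, by rw [List.length_drop]; omega, by rw [List.getElem_drop]; congr 1; omega⟩

def scanRec (t : Int) : List (Int × Int) → Int → List Int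
  | [], _ => []
  | x :: l, c =>
    if t < x.1 then x.2 :: scanRec t l c
    else if x.1 = t then (if 0 < c then scanRec t l (c - 1) else x.2 :: scanRec t l c)
    else scanRec t l c

theorem fold_scan (t : Int) : ∀ (zs : List (Int × Nat)) (c : Int) (acc : List Int),
    (zs.foldl
      (fun (st : Int × List Int) iv =>
        if t < iv.1 then (st.1, st.2 ++ [(iv.2 : Int) + 1])
        else if iv.1 = t then
          (if 0 < st.1 then (st.1 - 1, st.2) else (st.1, st.2 ++ [(iv.2 : Int) + 1]))
        else st)
      (c, acc)).2
    = acc ++ scanRec t (zs.map (fun iv => (iv.1, (iv.2 : Int) + 1))) c := by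
  intro zs
  induction zs with
  | nil => intro c acc; simp [scanRec]
  | cons z zs ih =>
      intro c acc
      simp only [List.foldl_cons, List.map_cons]
      by_cases h1 : t < z.1
      · rw [if_pos h1]
        rw [ih]
        rw [scanRec]
        rw [if_pos h1]
        simp
      · rw [if_neg h1]
        by_cases h2 : z.1 = t
        · rw [if_pos h2]
          by_cases h3 : (0:Int) < c
          · rw [if_pos h3, ih, scanRec, if_neg h1, if_pos h2, if_pos h3]
          · rw [if_neg h3, ih, scanRec, if_neg h1, if_pos h2, if_neg h3]
            simp
        · rw [if_neg h2, ih, scanRec, if_neg h1, if_neg h2]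

theorem scanRec_filter (t : Int) : ∀ (l : List (Int × Int)),
    l.Pairwise (fun a b => a.2 < b.2) → ∀ c : Int,
    scanRec t l c
      = (l.filter (fun x => decide (t < x.1) ||
          (decide (x.1 = t) &&
            decide (c ≤ (l.countP (fun y => decide (y.1 = t) && decide (y.2 < x.2)) : Int))))).map
        (fun x => x.2) := by
  intro l
  induction l with
  | nil => intro _ c; simp [scanRec]
  | cons z l ih =>
      intro hpw c
      obtain ⟨hz, hl⟩ := List.pairwise_cons.mp hpw
      -- the head's own count over z :: l is 0
      have hzcnt : ((z :: l).countP (fun y => decide (y.1 = t) && decide (y.2 < z.2)) : Int) = 0 := by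
        rw [List.countP_cons]
        have h0 : l.countP (fun y => decide (y.1 = t) && decide (y.2 < z.2)) = 0 := by
          rw [List.countP_eq_zero]
          intro a ha
          have := hz a ha
          simp; omega
        simp [h0]
      -- for tail members, the count over z :: l is the count over l plus the head's contribution
      have hcnt : ∀ x ∈ l, ((z :: l).countP (fun y => decide (y.1 = t) && decide (y.2 < x.2)) : Int)
          = (l.countP (fun y => decide (y.1 = t) && decide (y.2 < x.2)) : Int)
            + (if z.1 = t then 1 else 0) := by
        intro x hx
        rw [List.countP_cons]
        have : (decide (z.1 = t) && decide (z.2 < x.2)) = decide (z.1 = t) := by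
          have := hz x hx
          simp [this]
        rw [this]
        by_cases hzt : z.1 = t <;> simp [hzt]
      rw [scanRec]
      by_cases h1 : t < z.1
      · rw [if_pos h1, List.filter_cons_of_pos (by simp; omega), List.map_cons]
        congr 1
        rw [ih hl c]
        congr 1
        apply List.filter_congr
        intro x hx
        rw [hcnt x hx, if_neg (by omega)]
        simp
      · rw [if_neg h1]
        by_cases h2 : z.1 = t
        · rw [if_pos h2]
          by_cases h3 : (0:Int) < c
          · rw [if_pos h3, List.filter_cons_of_neg (by rw [hzcnt]; simp; omega)]
            rw [ih hl (c-1)]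
            congr 1
            apply List.filter_congr
            intro x hx
            rw [hcnt x hx, if_pos h2]
            by_cases ht : t < x.1
            · simp [ht]
            · congr 1
              by_cases hx2 : x.1 = t <;> simp [hx2]
          · rw [if_neg h3, List.filter_cons_of_pos (by rw [hzcnt]; simp; omega), List.map_cons]
            congr 1
            rw [ih hl c]
            congr 1
            apply List.filter_congr
            intro x hx
            rw [hcnt x hx, if_pos h2]
            by_cases ht : t < x.1
            · simp [ht]
            · congr 1
              by_cases hx2 : x.1 = t
              · simp [hx2]
                have hge : (0:Int) ≤ l.countP (fun y => decide (y.1 = t) && decide (y.2 < x.2)) := by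
                  positivity
                omega
              · simp [hx2]
        · rw [if_neg h2, List.filter_cons_of_neg (by simp [h1, h2]), ih hl c]
          congr 1
          apply List.filter_congr
          intro x hx
          rw [hcnt x hx, if_neg h2]
          simp

theorem LS_length (ft : List Int) : (LSof ft).length = ft.length := by
  rw [(LS_perm ft).length_eq, pairsOf, List.length_map, List.length_zipIdx]

theorem times_eq (ft : List Int) :
    PySem.List.sorted ft (fun x => x) = (LSof ft).map Prod.fst := by
  apply PySem.List.sorted_id_eq_of_perm_of_pairwise
  · refine ((LS_perm ft).map Prod.fst).trans ?_
    rw [pairsOf, List.map_map]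
    have h : (Prod.fst ∘ fun iv : Int × Nat => (iv.1, (iv.2 : Int) + 1)) = Prod.fst := rfl
    rw [h, List.zipIdx_map_fst]
  · have h := sorted2_pairwise_lex (pairsOf ft)
    rw [← LSof] at h
    rw [List.pairwise_map]
    refine h.imp ?_
    intro a b hab
    rw [← Bool.not_eq_true, pyLt_eq_true_iff] at hab
    simp at hab ⊢
    omega

theorem sorted_drop_eq_filter (ft : List Int) (j : Nat) :
    PySem.List.sorted ((LSof ft).drop j) (fun x => x.2)
      = (pairsOf ft).filter (fun x => decide (x ∈ (LSof ft).drop j)) := by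
  apply PySem.List.sorted_eq_of_perm_of_pairwise_lt
  · rw [List.perm_ext_iff_of_nodup ((pairsOf_nodup ft).filter _) ((LS_nodup ft).sublist (List.drop_sublist _ _))]
    intro a
    rw [List.mem_filter]
    simp only [decide_eq_true_eq]
    constructor
    · exact fun h => h.2
    · intro h
      exact ⟨(LS_perm ft).mem_iff.mp ((List.drop_sublist j _).mem h), h⟩
  · exact (pairsOf_pairwise_snd ft).sublist (List.filter_sublist)

theorem index_eq_below (ft : List Int) (j : Nat) (hj : j < ft.length) :
    ((PySem.List.index? ((LSof ft).map Prod.fst) (((LSof ft).map Prod.fst).getD j 0)).getD 0 : Nat)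
      = (pairsOf ft).countP (fun y => decide (y.1 < ((LSof ft).map Prod.fst).getD j 0)) := by
  set times := (LSof ft).map Prod.fst with hts
  have hlen : times.length = ft.length := by rw [hts, List.length_map, LS_length]
  have hpw : times.Pairwise (fun a b => a ≤ b) := by
    rw [hts, List.pairwise_map]
    refine (sorted2_pairwise_lex (pairsOf ft)).imp ?_
    intro a b hab
    rw [← Bool.not_eq_true, pyLt_eq_true_iff] at hab
    simp at hab; omega
  set t := times.getD j 0 with htd
  have htmem : t ∈ times := by
    rw [htd, List.getD_eq_getElem _ _ (by omega)]
    exact List.getElem_mem _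
  obtain ⟨m, hm⟩ := Option.isSome_iff_exists.mp ((PySem.List.index?_isSome_iff _ _).mpr htmem)
  obtain ⟨hmlt, hmv, hfirst⟩ := PySem.List.getElem_of_index?_eq_some hm
  rw [hm, Option.getD_some]
  -- count over pairsOf = count over times
  have hct : (pairsOf ft).countP (fun y => decide (y.1 < t)) = times.countP (fun v => decide (v < t)) := by
    rw [hts, ← (LS_perm ft).countP_eq, List.countP_map]
    rfl
  rw [hct]
  -- in a ≤-sorted list, the first index of t counts exactly the elements < t
  have hpg := List.pairwise_iff_getElem.mp hpw
  have e : times = times.take m ++ times[m] :: times.drop (m + 1) := by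
    rw [← List.drop_eq_getElem_cons hmlt, List.take_append_drop]
  conv_rhs => rw [e]
  rw [List.countP_append, List.countP_cons]
  have h1 : (times.take m).countP (fun v => decide (v < t)) = m := by
    rw [List.countP_eq_length.mpr, List.length_take]
    · omega
    · intro a ha
      obtain ⟨i, hi, rfl⟩ := List.mem_iff_getElem.mp ha
      rw [List.length_take] at hi
      rw [List.getElem_take]
      have hle : times[i] ≤ times[m] := hpg i m (by omega) hmlt (by omega)
      have hne : times[i] ≠ t := hfirst i (by omega)
      rw [hmv] at hle
      simp
      omega
  have h2 : (times.drop (m+1)).countP (fun v => decide (v < t)) = 0 := by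
    rw [List.countP_eq_zero]
    intro a ha
    obtain ⟨i, hi, rfl⟩ := List.mem_iff_getElem.mp ha
    rw [List.getElem_drop]
    simp only [List.length_drop] at hi
    have := hpg m (m+1+i) hmlt (by omega) (by omega)
    rw [hmv] at this
    simp
    omega
  rw [h1, h2, hmv]
  simp

theorem countP_or_disjoint {α : Type} (p q : α → Bool) : ∀ l : List α,
    (∀ a ∈ l, ¬(p a = true ∧ q a = true)) →
    l.countP (fun a => p a || q a) = l.countP p + l.countP q := by
  intro l
  induction l with
  | nil => intro _; simp
  | cons x l ih =>
      intro h
      simp only [List.countP_cons, ih (fun a ha => h a (List.mem_cons_of_mem _ ha))]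
      have := h x List.mem_cons_self
      cases hp : p x <;> cases hq : q x <;> simp [hp, hq] at this ⊢ <;> omega

theorem keep_iff (ft : List Int) (j : Nat) (hj : j < ft.length)
    (t : Int) (ht : t = ((LSof ft).map Prod.fst).getD j 0)
    (below : Nat) (hbelow : below = (pairsOf ft).countP (fun y => decide (y.1 < t)))
    (x : Int × Int) (hx : x ∈ pairsOf ft) :
    (decide (t < x.1) ||
        (decide (x.1 = t) &&
          decide ((j : Int) - (below : Int) ≤
            ((pairsOf ft).countP (fun y => decide (y.1 = t) && decide (y.2 < x.2)) : Int))))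
      = decide (x ∈ (LSof ft).drop j) := by
  have hjLS : j < (LSof ft).length := by rw [LS_length]; exact hj
  have hLSj : (LSof ft)[j].1 = t := by
    rw [ht, List.getD_eq_getElem _ _ (by rw [List.length_map]; exact hjLS), List.getElem_map]
  -- rank splits into the strictly-below count and the equal-value smaller-index count
  have hsplit : (pairsOf ft).countP (fun y => pyLt y x)
      = (pairsOf ft).countP (fun y => decide (y.1 < x.1))
        + (pairsOf ft).countP (fun y => decide (y.1 = x.1) && decide (y.2 < x.2)) := by
    have hfe : (fun y => pyLt y x)
        = (fun y : Int × Int => decide (y.1 < x.1) || (decide (y.1 = x.1) && decide (y.2 < x.2))) := by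
      funext y
      rw [Bool.eq_iff_iff, pyLt_eq_true_iff]
      simp
    rw [hfe]
    apply countP_or_disjoint
    intro a _ hpq
    simp at hpq
    omega
  -- below ≤ j
  have hbj : below ≤ j := by
    rw [hbelow, ← (LS_perm ft).countP_eq]
    calc (LSof ft).countP (fun y => decide (y.1 < t))
        ≤ (LSof ft).countP (fun y => pyLt y (LSof ft)[j]) := by
          apply List.countP_mono_left
          intro a _ hlt
          rw [pyLt_eq_true_iff, hLSj]
          simp at hlt
          left; exact hlt
      _ = j := strict_countP_lt _ (LS_pairwise_strict ft) j hjLS _ rfl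
  rw [Bool.eq_iff_iff]
  simp only [Bool.or_eq_true, Bool.and_eq_true, decide_eq_true_eq]
  rw [mem_drop_iff_rank ft j x hx, hsplit]
  rcases lt_trichotomy x.1 t with hc | hc | hc
  · -- value below the threshold: dropped on both sides
    constructor
    · intro h; omega
    · intro h
      exfalso
      -- rank x < below ≤ j
      have h1 : (pairsOf ft).countP (fun y => decide (y.1 < x.1))
            + (pairsOf ft).countP (fun y => decide (y.1 = x.1) && decide (y.2 < x.2))
          ≤ (pairsOf ft).countP (fun y => decide (y.1 < t) && !decide (y = x)) := by
        rw [← hsplit]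
        apply List.countP_mono_left
        intro a _ hlt
        rw [pyLt_eq_true_iff] at hlt
        have hne : a ≠ x := by
          intro e; subst e
          rcases hlt with h' | h' <;> omega
        simp [hne]
        omega
      have h2 := countP_split (fun y : Int × Int => decide (y.1 < t)) (fun y => decide (y = x)) (pairsOf ft)
      have h3 : 0 < (pairsOf ft).countP (fun y => decide (y.1 < t) && decide (y = x)) := by
        rw [List.countP_pos_iff]
        exact ⟨x, hx, by simp [hc]⟩
      omega
  · -- value equal to the threshold: kept iff enough equal values precede it
    have e1 : (pairsOf ft).countP (fun y => decide (y.1 < x.1)) = below := by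
      rw [hbelow, hc]
    have e2 : (pairsOf ft).countP (fun y => decide (y.1 = x.1) && decide (y.2 < x.2))
        = (pairsOf ft).countP (fun y => decide (y.1 = t) && decide (y.2 < x.2)) := by
      rw [hc]
    rw [e1, e2]
    constructor
    · intro h; omega
    · intro h; right; exact ⟨hc, by omega⟩
  · -- value above the threshold: always kept
    constructor
    · intro _
      have h1 : (pairsOf ft).countP (fun y => decide (y.1 ≤ t))
          ≤ (pairsOf ft).countP (fun y => pyLt y x) := by
        apply List.countP_mono_left
        intro a _ hle
        rw [pyLt_eq_true_iff]
        simp at hle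
        left; omega
      have h2 : j + 1 ≤ (pairsOf ft).countP (fun y => decide (y.1 ≤ t)) := by
        rw [← (LS_perm ft).countP_eq]
        calc j + 1 = ((LSof ft).take (j+1)).countP (fun y => decide (y.1 ≤ t)) := by
              rw [List.countP_eq_length.mpr, List.length_take]
              · omega
              · intro a ha
                obtain ⟨i, hi, rfl⟩ := List.mem_iff_getElem.mp ha
                rw [List.length_take] at hi
                rw [List.getElem_take]
                rcases Nat.lt_or_ge i j with hij | hij
                · have hpf := List.pairwise_iff_getElem.mp (LS_pairwise_strict ft) i j
                    (by omega) hjLS hij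
                  rw [pyLt_eq_true_iff] at hpf
                  simp only [decide_eq_true_eq]
                  rw [← hLSj]
                  rcases hpf with h | h
                  · exact le_of_lt h
                  · exact le_of_eq h.1
                · have hij2 : i = j := by omega
                  subst hij2
                  simp [hLSj]
          _ ≤ (LSof ft).countP (fun y => decide (y.1 ≤ t)) :=
              (List.take_sublist _ _).countP_le
      omega
    · intro _; left; exact hc

theorem times_getD (ft : List Int) (j : Nat) (hj : j < ft.length) :
    ((LSof ft).map Prod.fst).getD j 0 = ((LSof ft)[j]'(by rw [LS_length]; exact hj)).1 := by
  rw [List.getD_eq_getElem _ _ (by rw [List.length_map, LS_length]; exact hj), List.getElem_map]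

theorem drop_length_int (ft : List Int) (j : Nat) (hj : j ≤ ft.length) :
    (((LSof ft).drop j).length : Int) = (ft.length : Int) - (j : Int) := by
  rw [List.length_drop, LS_length]
  omega

theorem ref_break (ft : List Int) (k : Int) (jstar : Nat) (hjn : jstar < ft.length)
    (hbelow : ∀ i : Nat, i < jstar → Sv ((LSof ft).map Prod.fst) ft.length (i + 1) ≤ k)
    (hat : k < Sv ((LSof ft).map Prod.fst) ft.length (jstar + 1)) :
    altLoop (LSof ft) 0 k
      = ((PySem.List.sorted ((LSof ft).drop jstar) (fun x => x.2)).getD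
          (PySem.Int.mod (k - Sv ((LSof ft).map Prod.fst) ft.length jstar)
            ((ft.length : Int) - (jstar : Int))).toNat ((0 : Int), (0 : Int))).2 := by
  set times := (LSof ft).map Prod.fst with hts
  set n := ft.length with hn
  suffices h : ∀ d j : Nat, j + d = jstar →
      altLoop ((LSof ft).drop j) (prevAt times j) (k - Sv times n j)
        = ((PySem.List.sorted ((LSof ft).drop jstar) (fun x => x.2)).getD
            (PySem.Int.mod (k - Sv times n jstar) ((n : Int) - (jstar : Int))).toNat
            ((0 : Int), (0 : Int))).2 by
    have := h jstar 0 (by omega)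
    simpa [prevAt, Sv] using this
  intro d
  induction d with
  | zero =>
      intro j hd
      have hj : j = jstar := by omega
      subst hj
      have hjl : j < (LSof ft).length := by rw [LS_length]; omega
      have hdrop : (LSof ft).drop j = ((LSof ft)[j].1, (LSof ft)[j].2) :: (LSof ft).drop (j+1) := by
        rw [List.drop_eq_getElem_cons hjl]
      rw [hdrop, altLoop]
      have hlen : ((((LSof ft)[j].1, (LSof ft)[j].2) :: (LSof ft).drop (j+1)).length : Int)
          = (n : Int) - (j : Int) := by
        rw [← hdrop, drop_length_int ft j (by omega)]
      have htj : (LSof ft)[j].1 = times.getD j 0 := (times_getD ft j (by omega)).symm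
      have htemp : ((LSof ft)[j].1 - prevAt times j) * ((n : Int) - (j : Int))
          = Sv times n (j+1) - Sv times n j := by
        rw [htj, Sv_step times n j (by omega)]
        ring
      simp only [hlen]
      rw [if_pos (by rw [htemp]; omega), ← hdrop]
  | succ d ih =>
      intro j hd
      have hjlt : j < jstar := by omega
      have hjl : j < (LSof ft).length := by rw [LS_length]; omega
      have hdrop : (LSof ft).drop j = ((LSof ft)[j].1, (LSof ft)[j].2) :: (LSof ft).drop (j+1) := by
        rw [List.drop_eq_getElem_cons hjl]
      rw [hdrop, altLoop]
      have hlen : ((((LSof ft)[j].1, (LSof ft)[j].2) :: (LSof ft).drop (j+1)).length : Int)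
          = (n : Int) - (j : Int) := by
        rw [← hdrop, drop_length_int ft j (by omega)]
      have htj : (LSof ft)[j].1 = times.getD j 0 := (times_getD ft j (by omega)).symm
      have htemp : ((LSof ft)[j].1 - prevAt times j) * ((n : Int) - (j : Int))
          = Sv times n (j+1) - Sv times n j := by
        rw [htj, Sv_step times n j (by omega)]
        ring
      simp only [hlen]
      rw [if_neg (by rw [htemp]; have := hbelow j hjlt; omega)]
      have hprev : (LSof ft)[j].1 = prevAt times (j+1) := by
        rw [htj, prevAt]
        simp
      have hk2 : k - Sv times n j - ((LSof ft)[j].1 - prevAt times j) * ((n : Int) - (j : Int))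
          = k - Sv times n (j+1) := by
        rw [htemp]; ring
      rw [hk2, hprev]
      exact ih (j+1) (by omega)

theorem ref_nobreak (ft : List Int) (k : Int)
    (hall : ∀ i : Nat, i < ft.length → Sv ((LSof ft).map Prod.fst) ft.length (i + 1) ≤ k) :
    altLoop (LSof ft) 0 k = -1 := by
  set times := (LSof ft).map Prod.fst with hts
  set n := ft.length with hn
  suffices h : ∀ d j : Nat, j + d = n →
      altLoop ((LSof ft).drop j) (prevAt times j) (k - Sv times n j) = -1 by
    have := h n 0 (by omega)
    simpa [prevAt, Sv] using this
  intro d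
  induction d with
  | zero =>
      intro j hd
      have hj : j = n := by omega
      have : (LSof ft).drop j = [] := by
        apply List.drop_eq_nil_of_le
        rw [LS_length]; omega
      rw [this, altLoop]
  | succ d ih =>
      intro j hd
      have hjlt : j < n := by omega
      have hjl : j < (LSof ft).length := by rw [LS_length]; omega
      have hdrop : (LSof ft).drop j = ((LSof ft)[j].1, (LSof ft)[j].2) :: (LSof ft).drop (j+1) := by
        rw [List.drop_eq_getElem_cons hjl]
      rw [hdrop, altLoop]
      have hlen : ((((LSof ft)[j].1, (LSof ft)[j].2) :: (LSof ft).drop (j+1)).length : Int)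
          = (n : Int) - (j : Int) := by
        rw [← hdrop, List.length_drop, LS_length]
        omega
      have htj : (LSof ft)[j].1 = times.getD j 0 := (times_getD ft j (by omega)).symm
      have htemp : ((LSof ft)[j].1 - prevAt times j) * ((n : Int) - (j : Int))
          = Sv times n (j+1) - Sv times n j := by
        rw [htj, Sv_step times n j (by omega)]
        ring
      simp only [hlen]
      rw [if_neg (by rw [htemp]; have := hall j hjlt; omega)]
      have hprev : (LSof ft)[j].1 = prevAt times (j+1) := by
        rw [htj, prevAt]
        simp
      have hk2 : k - Sv times n j - ((LSof ft)[j].1 - prevAt times j) * ((n : Int) - (j : Int))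
          = k - Sv times n (j+1) := by
        rw [htemp]; ring
      rw [hk2, hprev]
      exact ih (j+1) (by omega)

theorem map_snd_getD (l : List (Int × Int)) (i : Nat) :
    (l.map (fun x => x.2)).getD i 0 = (l.getD i ((0 : Int), (0 : Int))).2 := by
  simp only [List.getD, List.getElem?_map]
  cases h : l[i]? <;> simp

theorem jstar_spec (times : List Int) (n : Nat) (k : Int) (hlen : times.length = n)
    (hpw : times.Pairwise (fun a b => a ≤ b)) (hn : 0 < n) (hkn : k < Sv times n n) :
    (List.range n).countP (fun i => decide (Sv times n (i+1) ≤ k)) < n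
    ∧ (∀ i : Nat, i < (List.range n).countP (fun i => decide (Sv times n (i+1) ≤ k)) →
        Sv times n (i+1) ≤ k)
    ∧ k < Sv times n ((List.range n).countP (fun i => decide (Sv times n (i+1) ≤ k)) + 1) := by
  set q : Nat → Bool := fun i => decide (Sv times n (i+1) ≤ k) with hq
  set c := (List.range n).countP q with hc
  -- q is downward closed on [0, n)
  have hdc : ∀ i i' : Nat, i' ≤ i → i < n → q i = true → q i' = true := by
    intro i i' hii hin hqi
    rw [hq] at hqi ⊢
    simp only [decide_eq_true_eq] at hqi ⊢
    exact le_trans (Sv_mono times n hlen hpw (i'+1) (i+1) (by omega) (by omega) (by omega)) hqi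
  have hclen : c ≤ n := by
    rw [hc]
    calc (List.range n).countP q ≤ (List.range n).length := List.countP_le_length
      _ = n := List.length_range
  have hcn : c < n := by
    rcases Nat.lt_or_ge c n with h | h
    · exact h
    · exfalso
      have hall : ∀ i ∈ List.range n, q i = true := by
        apply List.countP_eq_length.mp
        rw [← hc, List.length_range]
        omega
      have := hall (n-1) (by rw [List.mem_range]; omega)
      rw [hq] at this
      simp only [decide_eq_true_eq] at this
      have heq : n - 1 + 1 = n := by omega
      rw [heq] at this
      omega
  refine ⟨hcn, ?_, ?_⟩
  · intro i hic
    by_contra hqi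
    have hqi' : q i = false := by
      rw [hq]; simp only [decide_eq_false_iff_not]; exact hqi
    have hin : i < n := by omega
    -- all indices ≥ i fail q, so c ≤ i
    have hmono : ∀ a ∈ List.range n, q a = true → decide (a < i) = true := by
      intro a ha hqa
      rw [List.mem_range] at ha
      simp only [decide_eq_true_eq]
      by_contra hia
      have : q i = true := hdc a i (by omega) ha hqa
      rw [hqi'] at this
      exact absurd this (by simp)
    have := List.countP_mono_left hmono
    rw [cnt_lt_range n i (by omega)] at this
    omega
  · by_contra hqc
    have hqc' : q c = true := by
      rw [hq]; simp only [decide_eq_true_eq]; omega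
    have hmono : ∀ a ∈ List.range n, decide (a < c + 1) = true → q a = true := by
      intro a ha hac
      rw [List.mem_range] at ha
      simp only [decide_eq_true_eq] at hac
      exact hdc c a (by omega) hcn hqc'
    have := List.countP_mono_left hmono
    rw [cnt_lt_range n (c+1) (by omega)] at this
    omega

theorem ref_eq_alt (ft : List Int) (k : Int) :
    altLoop (LSof ft) 0 k = solution_alt ft k := by
  simp only [solution_alt]
  by_cases h0 : ft.length = 0
  · rw [if_pos h0]
    obtain rfl : ft = [] := List.length_eq_zero_iff.mp h0
    rfl
  · rw [if_neg h0]
    set n := ft.length with hn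
    set times := PySem.List.sorted ft (fun x => x) with hts
    have hteq : times = (LSof ft).map Prod.fst := by rw [hts]; exact times_eq ft
    have htlen : times.length = n := by
      rw [hts, hn, PySem.List.length_sorted]
    have hpw : times.Pairwise (fun a b => a ≤ b) := by
      have := PySem.List.sorted_pairwise ft (fun x => x)
      simpa using this
    rw [fold_S times n n]
    have hgetD : ∀ i : Nat, i ≤ n →
        ((List.range (n+1)).map (fun j => Sv times n j)).getD i 0 = Sv times n i := by
      intro i hi
      rw [List.getD_eq_getElem _ _ (by simp; omega), List.getElem_map, List.getElem_range]
    rw [hgetD n (le_refl n)]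
    by_cases hk : k ≥ Sv times n n
    · rw [if_pos hk]
      apply ref_nobreak
      intro i hi
      rw [← times_eq, ← hts]
      exact le_trans (Sv_mono times n htlen hpw (i+1) n (by omega) (by omega) (le_refl n)) hk
    · rw [if_neg hk]
      have hcq : (List.range n).countP
            (fun i => decide (((List.range (n+1)).map (fun j => Sv times n j)).getD (i+1) 0 ≤ k))
          = (List.range n).countP (fun i => decide (Sv times n (i+1) ≤ k)) := by
        apply List.countP_congr
        intro i hi
        rw [List.mem_range] at hi
        rw [hgetD (i+1) (by omega)]
      rw [hcq]
      obtain ⟨hcn, hbelowc, hatc⟩ := jstar_spec times n k htlen hpw (by omega) (by omega)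
      set c := (List.range n).countP (fun i => decide (Sv times n (i+1) ≤ k)) with hcdef
      rw [hgetD c (by omega)]
      -- LHS via the reference-loop break lemma
      have hL := ref_break ft k c (by omega)
        (by intro i hi; rw [← times_eq, ← hts, ← hn]; exact hbelowc i hi)
        (by rw [← times_eq, ← hts, ← hn]; exact hatc)
      rw [← hn, ← times_eq, ← hts] at hL
      rw [hL]
      -- RHS: survivors as a filter of the pairs list
      have hmap : ft.zipIdx.map (fun iv => (iv.1, (iv.2 : Int) + 1)) = pairsOf ft := rfl
      rw [fold_scan (times.getD c 0) ft.zipIdx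
        ((c : Int) - (((PySem.List.index? times (times.getD c 0)).getD 0 : Nat) : Int)) [],
        List.nil_append, hmap]
      rw [show ((PySem.List.index? times (times.getD c 0)).getD 0 : Nat)
            = (pairsOf ft).countP (fun y => decide (y.1 < times.getD c 0)) by
        rw [hteq]; exact index_eq_below ft c (by omega)]
      rw [scanRec_filter (times.getD c 0) (pairsOf ft) (pairsOf_pairwise_snd ft)]
      rw [List.filter_congr (fun x hx => keep_iff ft c (by omega) (times.getD c 0)
        (by rw [hteq])
        ((pairsOf ft).countP (fun y => decide (y.1 < times.getD c 0))) rfl x hx)]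
      rw [← sorted_drop_eq_filter ft c, map_snd_getD]

-- ===== VERDICT (by name: the statement is the Claim_ definition above) =====
theorem solution_spec : Claim_equal_solution := by
  intro food_times k _
  show solution food_times k = solution_alt food_times k
  exact (solution_eq_ref food_times k).trans (ref_eq_alt food_times k)
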